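-- pv_equiv track=rewrite | github.com/MnM300/dissertation | RulesForExtraction/eventCount.py | get_all_timex_sums
-- ===== SOURCE A (Python) =====
-- _TIMEX3_ = ["DATE", "TIME", "DURATION", "FREQUENCY"]
--
-- def get_event_count(event_type, event_list):
--     events = event_list.split(',')
--     count = 0
--     for index, event in enumerate(events):
--         if(event == event_type):
--             count += 1
--     return count
--
-- def get_all_timex_sums(sentence_events):
--     event_totals = []
--     for index, sentence_event in enumerate(sentence_events):
--         event_total = list(_TIMEX3_)
--         sentence_event = str(sentence_event).split('|')[0].split(':')[1] if str(sentence_event).split('|')[0].split(':')[0] != '0' else ''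
--         # sentence_event = str(sentence_event).split('|')[1].split(':')[1] if str(sentence_event).split('|')[1].split(':')[0] != '0' else ''
--         for index, eventType in enumerate(_TIMEX3_):
--             event_total[index] = get_event_count(eventType, sentence_event)
--         event_totals.append(event_total)
--     return event_totals
-- ===== SOURCE B (Python) =====
-- def get_all_timex_sums(sentence_events):
--     event_totals = []
--     for sentence_event in sentence_events:
--         parts = str(sentence_event).split('|')[0].split(':')
--         ev = parts[1] if parts[0] != '0' else ''
--         # one pass over the tokens, tallying directly into four scalar counters
--         d = t = u = f = 0
--         for tok in ev.split(','):
--             if tok == "DATE":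
--                 d += 1
--             elif tok == "TIME":
--                 t += 1
--             elif tok == "DURATION":
--                 u += 1
--             elif tok == "FREQUENCY":
--                 f += 1
--         event_totals.append([d, t, u, f])
--     return event_totals
-- ===== Notes on version B (the rewrite author's own statement) =====
-- stated objective: simpler
-- what changed: A scans the sentence's token list four separate times (get_event_count re-splits and rescans once per TIMEX3 type, writing into a scratch list); B makes a single pass over the tokens, tallying directly into four scalar accumulators with a branch chain, and emits the row from them.
import Mathlib
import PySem

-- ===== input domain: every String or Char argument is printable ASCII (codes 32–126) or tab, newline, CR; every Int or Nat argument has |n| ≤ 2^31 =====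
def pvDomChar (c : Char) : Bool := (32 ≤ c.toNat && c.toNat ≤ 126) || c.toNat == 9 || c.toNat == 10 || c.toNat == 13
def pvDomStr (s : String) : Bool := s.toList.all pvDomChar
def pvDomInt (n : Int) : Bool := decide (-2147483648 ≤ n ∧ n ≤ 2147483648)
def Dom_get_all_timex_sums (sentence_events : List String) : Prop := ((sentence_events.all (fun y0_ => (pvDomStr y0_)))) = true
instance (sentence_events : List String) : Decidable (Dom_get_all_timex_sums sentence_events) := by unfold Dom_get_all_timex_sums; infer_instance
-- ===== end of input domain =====

-- B replaces A's four per-type rescans of each sentence's token list with one pass tallying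
-- into four scalar accumulators (objective: simpler); the sentence parsing is kept identical.


-- s.split(sep) for a nonempty literal sep: PySem.Str.split? is none only for sep = "", so getD is exact here
def pvSplit (s sep : String) : List String :=
  (PySem.Str.split? s sep).getD []

-- ===== PORT A =====
def pvTIMEX3 : List String := ["DATE", "TIME", "DURATION", "FREQUENCY"]

def get_event_count (event_type : String) (event_list : String) : Int :=
  let events := pvSplit event_list ","
  (PySem.List.enumerate events 0).foldl
    (fun count p => if p.2 == event_type then count + 1 else count) 0

-- A's '… if ….split(':')[0] != '0' else '''-parsing; the [1] index is A's possible
-- IndexError, total here via pyGetD under Pre_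
def pvParseA (s : String) : String :=
  if (pvSplit ((pvSplit s "|").headD "") ":").headD "" ≠ "0"
  then PySem.List.pyGetD (pvSplit ((pvSplit s "|").headD "") ":") 1 "" else ""

def get_all_timex_sums (sentence_events : List String) : List (List Int) :=
  (PySem.List.enumerate sentence_events 0).foldl
    (fun event_totals p =>
      let sentence_event := pvParseA p.2
      -- event_total = list(_TIMEX3_): a 4-slot scratch list whose every slot the inner loop overwrites
      let event_total := (PySem.List.enumerate pvTIMEX3 0).foldl
        (fun et q => PySem.List.pySetD et q.1 (get_event_count q.2 sentence_event))
        [0, 0, 0, 0]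
      event_totals ++ [event_total]) []

-- ===== PORT B =====
-- Source B's inner loop: one pass over the tokens with four scalar accumulators
def pvTally (toks : List String) : Int × Int × Int × Int :=
  toks.foldl
    (fun s tok =>
      if tok == "DATE" then (s.1 + 1, s.2.1, s.2.2.1, s.2.2.2)
      else if tok == "TIME" then (s.1, s.2.1 + 1, s.2.2.1, s.2.2.2)
      else if tok == "DURATION" then (s.1, s.2.1, s.2.2.1 + 1, s.2.2.2)
      else if tok == "FREQUENCY" then (s.1, s.2.1, s.2.2.1, s.2.2.2 + 1)
      else s)
    (0, 0, 0, 0)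

def get_all_timex_sums_alt (sentence_events : List String) : List (List Int) :=
  sentence_events.map (fun se =>
    let parts := pvSplit ((pvSplit se "|").headD "") ":"
    let ev := if parts.headD "" ≠ "0" then PySem.List.pyGetD parts 1 "" else ""
    let r := pvTally (pvSplit ev ",")
    [r.1, r.2.1, r.2.2.1, r.2.2.2])

-- ===== PRECONDITION & SPEC =====
-- Pre_ excludes exactly the inputs where A (and B alike) raises IndexError: a sentence whose
-- part before the first '|' contains no ':' and is not the string "0".
def Pre_get_all_timex_sums (sentence_events : List String) : Prop :=
  ∀ s ∈ sentence_events,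
    (pvSplit ((pvSplit s "|").headD "") ":").headD "" = "0" ∨
    2 ≤ (pvSplit ((pvSplit s "|").headD "") ":").length

instance (sentence_events : List String) : Decidable (Pre_get_all_timex_sums sentence_events) := by
  unfold Pre_get_all_timex_sums; infer_instance

def pvWitness_get_all_timex_sums : List String := ["1:DATE,TIME,DATE|x", "0", "a:"]

def Spec_get_all_timex_sums (sentence_events : List String) (out : List (List Int)) : Prop := out = get_all_timex_sums_alt sentence_events
instance (sentence_events : List String) (out : List (List Int)) : Decidable (Spec_get_all_timex_sums sentence_events out) := by unfold Spec_get_all_timex_sums; infer_instance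

-- ===== CLAIM (what is proved, stated in full; the proofs are below) =====
def Claim_equal_get_all_timex_sums : Prop := ∀ (sentence_events : List String), Dom_get_all_timex_sums sentence_events → Pre_get_all_timex_sums sentence_events → Spec_get_all_timex_sums sentence_events (get_all_timex_sums sentence_events)

-- ===== LEMMAS AND PROOFS =====

-- A's counting loop over enumerate ignores the index: it is List.count
lemma count_loop (t : String) (xs : List String) (s a : Int) :
    (PySem.List.enumerate xs s).foldl
      (fun count p => if p.2 == t then count + 1 else count) a = a + xs.count t := by
  induction xs generalizing s a with
  | nil => simp [PySem.List.enumerate_nil]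
  | cons x xs ih =>
      simp only [PySem.List.enumerate_cons, List.foldl_cons, List.count_cons, ih]
      by_cases h : x == t <;> simp [h]
      ring

lemma get_event_count_eq (t ev : String) :
    get_event_count t ev = (pvSplit ev ",").count t := by
  unfold get_event_count
  rw [count_loop]
  simp

-- B's single-pass tally computes the four counts
lemma tally_loop (xs : List String) (a b c d : Int) :
    xs.foldl
      (fun s tok =>
        if tok == "DATE" then (s.1 + 1, s.2.1, s.2.2.1, s.2.2.2)
        else if tok == "TIME" then (s.1, s.2.1 + 1, s.2.2.1, s.2.2.2)
        else if tok == "DURATION" then (s.1, s.2.1, s.2.2.1 + 1, s.2.2.2)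
        else if tok == "FREQUENCY" then (s.1, s.2.1, s.2.2.1, s.2.2.2 + 1)
        else s)
      (a, b, c, d)
    = (a + xs.count "DATE", b + xs.count "TIME",
       c + xs.count "DURATION", d + xs.count "FREQUENCY") := by
  induction xs generalizing a b c d with
  | nil => simp
  | cons x xs ih =>
      simp only [List.foldl_cons, List.count_cons]
      by_cases h1 : x == "DATE"
      · simp only [h1, if_pos]
        rw [ih]
        simp_all
        ring
      · by_cases h2 : x == "TIME"
        · simp only [h1, h2, if_neg, if_pos, Bool.false_eq_true, not_false_iff]
          rw [ih]
          simp_all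
          ring
        · by_cases h3 : x == "DURATION"
          · simp only [h1, h2, h3, Bool.false_eq_true, if_neg, if_pos, not_false_iff]
            rw [ih]
            simp_all
            ring
          · by_cases h4 : x == "FREQUENCY"
            · simp only [h1, h2, h3, h4, Bool.false_eq_true, if_neg, if_pos, not_false_iff]
              rw [ih]
              simp_all
              ring
            · simp only [h1, h2, h3, h4, Bool.false_eq_true, if_neg, not_false_iff]
              rw [ih]
              simp_all

lemma pvTally_eq (toks : List String) :
    pvTally toks = ((toks.count "DATE" : Int), (toks.count "TIME" : Int),
                    (toks.count "DURATION" : Int), (toks.count "FREQUENCY" : Int)) := by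
  unfold pvTally; rw [tally_loop]; simp

-- the per-sentence row A builds equals B's tally row
lemma row_eq (se : String) :
    (PySem.List.enumerate pvTIMEX3 0).foldl
      (fun et q => PySem.List.pySetD et q.1 (get_event_count q.2 (pvParseA se)))
      [0, 0, 0, 0]
    = (let parts := pvSplit ((pvSplit se "|").headD "") ":"
       let ev := if parts.headD "" ≠ "0" then PySem.List.pyGetD parts 1 "" else ""
       let r := pvTally (pvSplit ev ",")
       [r.1, r.2.1, r.2.2.1, r.2.2.2]) := by
  simp only [pvTIMEX3, PySem.List.enumerate_cons, PySem.List.enumerate_nil,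
    List.foldl_cons, List.foldl_nil]
  show [get_event_count "DATE" (pvParseA se), get_event_count "TIME" (pvParseA se),
        get_event_count "DURATION" (pvParseA se), get_event_count "FREQUENCY" (pvParseA se)] = _
  simp only [get_event_count_eq, pvParseA, pvTally_eq]

-- A's outer loop over enumerate ignores the index and appends one row per sentence: it is map
lemma outer_loop (f : String → List Int) (xs : List String) (s : Int) (acc : List (List Int)) :
    (PySem.List.enumerate xs s).foldl (fun tot p => tot ++ [f p.2]) acc = acc ++ xs.map f := by
  induction xs generalizing s acc with
  | nil => simp [PySem.List.enumerate_nil]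
  | cons x xs ih => simp [PySem.List.enumerate_cons, ih]

-- ===== VERDICT (by name: the statement is the Claim_ definition above) =====
theorem get_all_timex_sums_spec : Claim_equal_get_all_timex_sums := by
  intro ses _ _
  unfold Spec_get_all_timex_sums get_all_timex_sums get_all_timex_sums_alt
  rw [outer_loop (f := fun se =>
    (PySem.List.enumerate pvTIMEX3 0).foldl
      (fun et q => PySem.List.pySetD et q.1 (get_event_count q.2 (pvParseA se)))
      [0, 0, 0, 0])]
  simp only [row_eq, List.nil_append]
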